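-- pv_equiv track=rewrite | github.com/lucas465/Radar2 | test_2.py | text_filter_herausgeber
-- ===== SOURCE A (Python) =====
-- def text_filter_herausgeber(input, target_list):
--     final_herausgeber = []
--     for i in input:
--         r = i.split()
--         tmp_list = []
--         for j in r:
--             test = [x for x in target_list if x in j]
--             if test != []:
--                 tmp_list.append(test)
--         if tmp_list == []:
--             final_herausgeber.append("tbd")
--         else:
--             final_herausgeber.append(tmp_list[0][0])
--     return final_herausgeber
-- ===== SOURCE B (Python) =====
-- def _first_word_index(t, words):
--     for i, w in enumerate(words):
--         if t in w:
--             return i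
--     return None
--
--
-- def text_filter_herausgeber(input, target_list):
--     # Loop interchange: iterate targets in the outer loop, compute each target's
--     # first word position, and keep the argmin position (strict < keeps the
--     # earlier target on ties), instead of A's word-major scan that collects all
--     # per-word match lists and indexes [0][0].
--     result = []
--     for s in input:
--         words = s.split()
--         best = None
--         for t in target_list:
--             wi = _first_word_index(t, words)
--             if wi is not None and (best is None or wi < best[0]):
--                 best = (wi, t)
--         result.append(best[1] if best is not None else "tbd")
--     return result
-- ===== Notes on version B (the rewrite author's own statement) =====
-- stated objective: alternative
-- what changed: B interchanges the loops: instead of A's word-major scan that collects a list of per-word match lists and indexes [0][0], B iterates the targets in the outer loop, reduces each target to its first word position, and selects the argmin position (strict < keeps the earlier target on ties), which yields the same first-word/first-target choice.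
import Mathlib
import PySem

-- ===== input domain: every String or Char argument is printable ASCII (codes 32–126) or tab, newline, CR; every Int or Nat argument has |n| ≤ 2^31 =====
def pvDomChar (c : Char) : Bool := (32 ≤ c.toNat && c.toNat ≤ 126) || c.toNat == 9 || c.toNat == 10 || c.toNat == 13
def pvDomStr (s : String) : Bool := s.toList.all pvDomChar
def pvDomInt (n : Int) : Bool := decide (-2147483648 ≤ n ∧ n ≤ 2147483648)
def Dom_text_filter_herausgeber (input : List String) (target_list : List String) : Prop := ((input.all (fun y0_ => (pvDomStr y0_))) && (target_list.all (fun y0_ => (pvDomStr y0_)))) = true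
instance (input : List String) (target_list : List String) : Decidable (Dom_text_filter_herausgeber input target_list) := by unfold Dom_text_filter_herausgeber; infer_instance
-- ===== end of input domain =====

-- B swaps the loop nesting: targets in the outer loop, each reduced to its first
-- word position, then an argmin selection — instead of A's word-major scan that
-- collects per-word match lists and indexes [0][0] (objective: alternative).

-- ===== PORT A =====
-- Literal transliteration of A: outer loop appends per string; inner loop builds
-- tmp_list of nonempty match lists; result is tmp_list[0][0] or "tbd".
-- (tmp_list[0][0] is taken with headD defaults, reached only when tmp_list and its
-- head are nonempty, exactly as in Python where it cannot raise.)
def text_filter_herausgeber (input : List String) (target_list : List String) : List String :=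
  input.foldl (fun final_herausgeber i =>
    let r := PySem.Str.split₀ i
    let tmp_list := r.foldl (fun tmp j =>
      let test := target_list.filter (fun x => PySem.Str.isIn x j)
      if test ≠ [] then tmp ++ [test] else tmp) []
    if tmp_list = [] then final_herausgeber ++ ["tbd"]
    else final_herausgeber ++ [(tmp_list.headD []).headD "tbd"]) []

-- ===== PORT B =====
-- helper: B's _first_word_index (enumerate loop returning the first index whose
-- word contains t, else None)
def firstWordIndex (t : String) : List String → Nat → Option Nat
  | [], _ => none
  | w :: ws, i => if PySem.Str.isIn t w then some i else firstWordIndex t ws (i + 1)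

-- Literal transliteration of B: per string, fold over target_list keeping the
-- best (word-index, target) pair (strict < keeps the earlier target on ties).
def text_filter_herausgeber_alt (input : List String) (target_list : List String) : List String :=
  input.foldl (fun result s =>
    let words := PySem.Str.split₀ s
    let best := target_list.foldl (fun best t =>
      match firstWordIndex t words 0, best with
      | none, b => b
      | some wi, none => some (wi, t)
      | some wi, some b => if wi < b.1 then some (wi, t) else some b) none
    result ++ [match best with | some b => b.2 | none => "tbd"]) []

-- ===== PRECONDITION & SPEC =====
def Spec_text_filter_herausgeber (input : List String) (target_list : List String) (out : List String) : Prop := out = text_filter_herausgeber_alt input target_list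
instance (input : List String) (target_list : List String) (out : List String) : Decidable (Spec_text_filter_herausgeber input target_list out) := by unfold Spec_text_filter_herausgeber; infer_instance

-- ===== CLAIM (what is proved, stated in full; the proofs are below) =====
def Claim_equal_text_filter_herausgeber : Prop := ∀ (input : List String) (target_list : List String), Dom_text_filter_herausgeber input target_list → Spec_text_filter_herausgeber input target_list (text_filter_herausgeber input target_list)

-- ===== LEMMAS AND PROOFS =====

-- left-biased min on optional (index, target) candidates
def pvMerge (a b : Option (Nat × String)) : Option (Nat × String) :=
  match a, b with
  | none, b => b
  | some a, none => some a
  | some a, some b => if b.1 < a.1 then some b else some a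

-- the candidate a single target contributes
def pvCand (r : List String) (t : String) : Option (Nat × String) :=
  (firstWordIndex t r 0).map (fun i => (i, t))

-- B's inner fold, named
def pvSel (r : List String) (T : List String) : Option (Nat × String) :=
  T.foldl (fun best t =>
    match firstWordIndex t r 0, best with
    | none, b => b
    | some wi, none => some (wi, t)
    | some wi, some b => if wi < b.1 then some (wi, t) else some b) none

theorem pv_step_eq_merge (r : List String) (b : Option (Nat × String)) (t : String) :
    (match firstWordIndex t r 0, b with
      | none, b => b
      | some wi, none => some (wi, t)
      | some wi, some b => if wi < b.1 then some (wi, t) else some b)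
    = pvMerge b (pvCand r t) := by
  cases h : firstWordIndex t r 0 <;> cases b <;> simp [pvMerge, pvCand, h]

theorem pvMerge_none_right (x : Option (Nat × String)) : pvMerge x none = x := by
  cases x <;> rfl

theorem pvMerge_assoc (a b c : Option (Nat × String)) :
    pvMerge (pvMerge a b) c = pvMerge a (pvMerge b c) := by
  cases a with
  | none => rfl
  | some a => cases b with
    | none => rfl
    | some b => cases c with
      | none => rw [pvMerge_none_right, pvMerge_none_right]
      | some c =>
        by_cases h1 : b.1 < a.1 <;> by_cases h2 : c.1 < b.1 <;> by_cases h3 : c.1 < a.1 <;>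
          simp [pvMerge, h1, h2, h3] <;> first | rfl | (exfalso; omega)

theorem pv_foldl_merge (r : List String) (T : List String) (st : Option (Nat × String)) :
    T.foldl (fun best t =>
      match firstWordIndex t r 0, best with
      | none, b => b
      | some wi, none => some (wi, t)
      | some wi, some b => if wi < b.1 then some (wi, t) else some b) st
    = pvMerge st (pvSel r T) := by
  induction T generalizing st with
  | nil => cases st <;> simp [pvSel, pvMerge]
  | cons t ts ih =>
      have h2 : pvSel r (t :: ts) = pvMerge (pvCand r t) (pvSel r ts) := by
        simp only [pvSel, List.foldl_cons]
        rw [pv_step_eq_merge, ih]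
        rfl
      rw [List.foldl_cons, pv_step_eq_merge, ih, h2, ← pvMerge_assoc]

theorem pvSel_cons (r : List String) (t : String) (ts : List String) :
    pvSel r (t :: ts) = pvMerge (pvCand r t) (pvSel r ts) := by
  simp only [pvSel, List.foldl_cons]
  rw [pv_step_eq_merge, pv_foldl_merge]
  rfl

theorem pv_firstWordIndex_shift (t : String) (l : List String) (i : Nat) :
    firstWordIndex t l i = (firstWordIndex t l 0).map (· + i) := by
  induction l generalizing i with
  | nil => simp [firstWordIndex]
  | cons w ws ih =>
      simp only [firstWordIndex]
      by_cases h : PySem.Str.isIn t w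
      · rw [if_pos h, if_pos h]; simp
      · rw [if_neg h, if_neg h, ih (i + 1), ih 1, Option.map_map]
        congr 1; funext x; simp only [Function.comp_apply]; omega

def pvShift (p : Nat × String) : Nat × String := (p.1 + 1, p.2)

theorem pvMerge_map_shift (a b : Option (Nat × String)) :
    pvMerge (a.map pvShift) (b.map pvShift) = (pvMerge a b).map pvShift := by
  cases a with
  | none => rfl
  | some a => cases b with
    | none => rfl
    | some b =>
      by_cases h : b.1 < a.1 <;> simp [pvMerge, pvShift, h]

theorem pvMerge_zero_left (t : String) (x : Option (Nat × String)) :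
    pvMerge (some (0, t)) x = some (0, t) := by
  cases x <;> simp [pvMerge]

theorem pvMerge_shift_zero (x : Option (Nat × String)) (t : String) :
    pvMerge (x.map pvShift) (some (0, t)) = some (0, t) := by
  cases x <;> simp [pvMerge, pvShift]

-- B's selection on (w :: ws): the first target contained in w, else a shifted
-- copy of the selection over the remaining words
theorem pv_sel_words_cons (T : List String) (w : String) (ws : List String) :
    pvSel (w :: ws) T =
      match T.find? (fun t => PySem.Str.isIn t w) with
      | some t => some (0, t)
      | none => (pvSel ws T).map pvShift := by
  induction T with
  | nil => simp [pvSel]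
  | cons t ts ih =>
      rw [pvSel_cons, ih]
      by_cases h : PySem.Str.isIn t w
      · have hfind : (t :: ts).find? (fun t => PySem.Str.isIn t w) = some t :=
          List.find?_cons_of_pos h
        rw [hfind]
        have hc : pvCand (w :: ws) t = some (0, t) := by
          simp only [pvCand, firstWordIndex]; rw [if_pos h]; rfl
        rw [hc]
        cases hf : ts.find? (fun t => PySem.Str.isIn t w) <;>
          simp only [pvMerge_zero_left]
      · have hfind : (t :: ts).find? (fun t => PySem.Str.isIn t w)
            = ts.find? (fun t => PySem.Str.isIn t w) :=
          List.find?_cons_of_neg h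
        rw [hfind]
        have hc : pvCand (w :: ws) t = (pvCand ws t).map pvShift := by
          simp only [pvCand, firstWordIndex]
          rw [if_neg h, pv_firstWordIndex_shift t ws 1]
          cases firstWordIndex t ws 0 <;> rfl
        rw [hc]
        cases hf : ts.find? (fun t => PySem.Str.isIn t w) with
        | some t' => rw [pvMerge_shift_zero]
        | none => rw [pvMerge_map_shift, pvSel_cons]

theorem pvSel_nil_words (T : List String) : pvSel [] T = none := by
  induction T with
  | nil => rfl
  | cons t ts ih =>
      rw [pvSel_cons, ih]
      simp [pvCand, firstWordIndex, pvMerge]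

-- the target B selects is exactly what A's word-major findSome?/find? scan finds
theorem pv_sel_answer (r : List String) (T : List String) :
    (pvSel r T).map Prod.snd
      = r.findSome? (fun w => T.find? (fun t => PySem.Str.isIn t w)) := by
  induction r with
  | nil => simp [pvSel_nil_words]
  | cons w ws ih =>
      rw [pv_sel_words_cons, List.findSome?_cons]
      cases hf : T.find? (fun t => PySem.Str.isIn t w) with
      | some t => rfl
      | none =>
          rw [Option.map_map]
          have hsnd : (Prod.snd ∘ pvShift) = (Prod.snd : Nat × String → String) :=
            funext fun p => rfl
          rw [hsnd, ih]

-- ---- A side: A's per-string value in findSome?/find? form ----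

-- first element of a filter is find?
theorem pv_head?_filter {a : Type} (p : a → Bool) (l : List a) :
    (l.filter p).head? = l.find? p := by
  induction l with
  | nil => rfl
  | cons x t ih =>
      by_cases h : p x = true
      · simp [h]
      · simp [h, ih]

-- A's inner loop collects exactly the nonempty match lists, in order
theorem pv_fold_inner (g : String → List String) (r : List String) :
    ∀ acc : List (List String),
      r.foldl (fun tmp j => if g j ≠ [] then tmp ++ [g j] else tmp) acc
      = acc ++ (r.map g).filter (fun l => !l.isEmpty) := by
  induction r with
  | nil => intro acc; simp
  | cons j t ih =>
      intro acc
      by_cases h : g j = []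
      · rw [List.foldl_cons, if_neg (fun hc => hc h), ih]
        simp [h]
      · rw [List.foldl_cons, if_pos h, ih]
        simp [List.isEmpty_eq_false_iff.mpr h]

-- findSome? of heads, rephrased through the filtered map
theorem pv_first (g : String → List String) (r : List String) :
    r.findSome? (fun w => (g w).head?)
    = (((r.map g).filter (fun l => !l.isEmpty)).headD []).head? := by
  induction r with
  | nil => rfl
  | cons w t ih =>
      by_cases h : g w = []
      · simp [h, ih]
      · obtain ⟨a, l, hl⟩ := List.exists_cons_of_ne_nil h
        simp [hl]

-- a list of nonempty lists: first-of-first vs head?-of-head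
theorem pv_head_combine (L : List (List String)) (h : ∀ l ∈ L, l ≠ []) :
    (if L = [] then "tbd" else (L.headD []).headD "tbd")
    = ((L.headD []).head?).getD "tbd" := by
  match L, h with
  | [], _ => simp
  | l :: rest, h =>
      obtain ⟨a, t, ht⟩ := List.exists_cons_of_ne_nil (h l List.mem_cons_self)
      simp [ht]

-- per-string value of A in findSome? form
theorem pv_one_string (target_list : List String) (r : List String) :
    (let tmp_list := r.foldl (fun tmp j =>
        let test := target_list.filter (fun x => PySem.Str.isIn x j)
        if test ≠ [] then tmp ++ [test] else tmp) ([] : List (List String))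
      if tmp_list = [] then "tbd" else (tmp_list.headD []).headD "tbd")
    = (r.findSome? (fun w => target_list.find? (fun t => PySem.Str.isIn t w))).getD "tbd" := by
  have hfind : ∀ w, target_list.find? (fun t => PySem.Str.isIn t w)
      = (target_list.filter (fun x => PySem.Str.isIn x w)).head? :=
    fun w => (pv_head?_filter _ _).symm
  simp only [hfind]
  rw [pv_first (fun w => target_list.filter (fun x => PySem.Str.isIn x w)) r]
  simp only [pv_fold_inner (fun w => target_list.filter (fun x => PySem.Str.isIn x w)) r [],
    List.nil_append]
  apply pv_head_combine
  intro l hl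
  have hmem := (List.mem_filter.mp hl).2
  simpa [List.isEmpty_eq_false_iff] using hmem

-- per-string value of B through pvSel
theorem pv_one_string_B (target_list : List String) (r : List String) :
    (match pvSel r target_list with | some b => b.2 | none => "tbd")
    = ((pvSel r target_list).map Prod.snd).getD "tbd" := by
  cases pvSel r target_list <;> rfl

-- ===== VERDICT (by name: the statement is the Claim_ definition above) =====
theorem text_filter_herausgeber_spec : Claim_equal_text_filter_herausgeber := by
  intro input target_list _
  show text_filter_herausgeber input target_list = text_filter_herausgeber_alt input target_list
  unfold text_filter_herausgeber text_filter_herausgeber_alt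
  congr 1
  funext acc s
  show (if ((PySem.Str.split₀ s).foldl (fun tmp j =>
          let test := target_list.filter (fun x => PySem.Str.isIn x j)
          if test ≠ [] then tmp ++ [test] else tmp) ([] : List (List String))) = []
        then acc ++ ["tbd"]
        else acc ++ [(((PySem.Str.split₀ s).foldl (fun tmp j =>
          let test := target_list.filter (fun x => PySem.Str.isIn x j)
          if test ≠ [] then tmp ++ [test] else tmp) []).headD []).headD "tbd"])
    = acc ++ [match pvSel (PySem.Str.split₀ s) target_list with | some b => b.2 | none => "tbd"]
  rw [← apply_ite (fun x => acc ++ [x])]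
  congr 2
  rw [pv_one_string_B, pv_sel_answer]
  exact pv_one_string target_list (PySem.Str.split₀ s)
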